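-- pv_equiv track=rewrite | github.com/wisebarbie/misc | 202-19F-A4/SELIN/construct_patients.py | validate_temp
-- ===== SOURCE A (Python) =====
-- def validate_temp(token):
--     didNumberStart =  False
--     decimalPointCount= 0
--     cleanTemp = []
--     for char in token:
--         if char.isdigit():
--             didNumberStart=True
--             cleanTemp.append(char)
--         if char == '.' and didNumberStart and decimalPointCount == 0:
--             decimalPointCount += 1
--             cleanTemp.append(char)
--     return ''.join(cleanTemp)
-- ===== SOURCE B (Python) =====
-- def validate_temp(token):
--     digits = lambda s: ''.join(c for c in s if c.isdigit())
--     first = next((i for i, c in enumerate(token) if c.isdigit()), None)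
--     if first is None:
--         return ''
--     dot = next((j for j in range(first, len(token)) if token[j] == '.'), None)
--     if dot is None:
--         return digits(token)
--     return digits(token[:dot]) + '.' + digits(token[dot + 1:])
-- ===== Notes on version B (the rewrite author's own statement) =====
-- stated objective: simpler
-- what changed: Replaces A's single stateful scan (didNumberStart/decimalPointCount flags with an accumulator) by a locate-split-then-filter decomposition: find the first digit, find the first decimal point at or after it, and join the digit filters of the two halves around one decimal point.
import Mathlib
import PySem

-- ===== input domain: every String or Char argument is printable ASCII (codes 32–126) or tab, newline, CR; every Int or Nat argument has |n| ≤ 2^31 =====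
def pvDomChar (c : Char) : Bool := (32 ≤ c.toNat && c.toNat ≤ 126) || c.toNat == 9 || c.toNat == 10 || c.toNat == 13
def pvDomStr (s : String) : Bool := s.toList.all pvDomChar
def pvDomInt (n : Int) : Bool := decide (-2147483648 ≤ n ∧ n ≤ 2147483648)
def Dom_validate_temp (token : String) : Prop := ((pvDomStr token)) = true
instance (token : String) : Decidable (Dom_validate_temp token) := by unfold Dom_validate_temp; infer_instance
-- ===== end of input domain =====

-- B replaces A's stateful flag-scan by locate (first digit, first '.' after it), split and filter; objective: simpler.

-- ===== PORT A =====
-- the for-loop of A: state (didNumberStart, decimalPointCount, cleanTemp)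
def aLoop : List Char → Bool → Int → List Char → List Char
  | [], _, _, acc => acc
  | c :: rest, started, cnt, acc =>
    let started' := if PySem.Chars.isdigit c then true else started
    let acc' := if PySem.Chars.isdigit c then acc ++ [c] else acc
    if c == '.' && started' && cnt == 0 then aLoop rest started' (cnt + 1) (acc' ++ [c])
    else aLoop rest started' cnt acc'

def validate_temp (token : String) : String :=
  String.ofList (aLoop token.toList false 0 [])

-- ===== PORT B =====
-- ''.join(c for c in s if c.isdigit())
def bDigits (cs : List Char) : List Char := cs.filter PySem.Chars.isdigit

def validate_temp_alt (token : String) : String :=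
  let cs := token.toList
  match List.findIdx? PySem.Chars.isdigit cs with
  | none => ""
  | some i =>
    match List.findIdx? (fun c => c == '.') (cs.drop i) with
    | none => String.ofList (bDigits cs)
    | some j => String.ofList (bDigits (cs.take (i + j)) ++ '.' :: bDigits (cs.drop (i + j + 1)))

-- ===== PRECONDITION & SPEC =====
def Spec_validate_temp (token : String) (out : String) : Prop := out = validate_temp_alt token
instance (token : String) (out : String) : Decidable (Spec_validate_temp token out) := by unfold Spec_validate_temp; infer_instance

-- ===== CLAIM (what is proved, stated in full; the proofs are below) =====
def Claim_equal_validate_temp : Prop := ∀ (token : String), Dom_validate_temp token → Spec_validate_temp token (validate_temp token)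

-- ===== LEMMAS AND PROOFS =====

lemma aLoop_acc (cs : List Char) : ∀ (s : Bool) (k : Int) (acc : List Char),
    aLoop cs s k acc = acc ++ aLoop cs s k [] := by
  induction cs with
  | nil => intro s k acc; simp [aLoop]
  | cons c rest ih =>
    intro s k acc
    simp only [aLoop]
    repeat' split
    all_goals (try (conv_lhs => rw [ih]))
    all_goals (try (conv_rhs => rw [ih]))
    all_goals simp

lemma aLoop_done (cs : List Char) : ∀ (k : Int), k ≠ 0 →
    aLoop cs true k [] = cs.filter PySem.Chars.isdigit := by
  induction cs with
  | nil => intro k hk; simp [aLoop]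
  | cons c rest ih =>
    intro k hk
    have hk' : (k == 0) = false := by simpa using hk
    simp only [aLoop, hk', Bool.and_false, if_false, Bool.false_eq_true]
    by_cases hd : PySem.Chars.isdigit c = true <;>
      · rw [aLoop_acc]
        simp [hd, List.filter_cons, ih k hk]

lemma aLoop_started (cs : List Char) :
    aLoop cs true 0 [] =
      match List.findIdx? (fun c => c == '.') cs with
      | none => cs.filter PySem.Chars.isdigit
      | some j => (cs.take j).filter PySem.Chars.isdigit ++
          '.' :: (cs.drop (j + 1)).filter PySem.Chars.isdigit := by
  induction cs with
  | nil => simp [aLoop]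
  | cons c rest ih =>
    by_cases hp : (c == '.') = true
    · have hc : c = '.' := by simpa using hp
      subst hc
      have hd : PySem.Chars.isdigit '.' = false := by decide
      simp only [aLoop, hd, List.findIdx?_cons]
      rw [aLoop_acc]
      simp [aLoop_done rest 1 (by decide)]
    · have hp' : (c == '.') = false := by simpa using hp
      by_cases hd : PySem.Chars.isdigit c = true <;>
      cases h : List.findIdx? (fun c => c == '.') rest <;>
      · simp only [aLoop, List.findIdx?_cons, hp', hd, if_true, if_false, Bool.false_eq_true,
          Bool.and_false, Bool.false_and, Bool.and_true, Bool.true_and, Option.map_none,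
          Option.map_some, h]
        try rw [aLoop_acc]
        rw [ih, h]
        simp [List.filter_cons, hd]

lemma aLoop_main (cs : List Char) :
    aLoop cs false 0 [] =
      match List.findIdx? PySem.Chars.isdigit cs with
      | none => []
      | some i =>
        match List.findIdx? (fun c => c == '.') (cs.drop i) with
        | none => cs.filter PySem.Chars.isdigit
        | some j => (cs.take (i + j)).filter PySem.Chars.isdigit ++
            '.' :: (cs.drop (i + j + 1)).filter PySem.Chars.isdigit := by
  induction cs with
  | nil => simp [aLoop]
  | cons c rest ih =>
    by_cases hd : PySem.Chars.isdigit c = true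
    · have hp' : (c == '.') = false := by
        cases hcc : (c == '.') with
        | true => exact absurd hd (by simp at hcc; subst hcc; decide)
        | false => rfl
      simp only [aLoop, hd, hp', List.findIdx?_cons, if_true, Bool.false_and, Bool.and_false,
        if_false, Bool.false_eq_true, List.drop_zero]
      rw [aLoop_acc, aLoop_started]
      cases h : List.findIdx? (fun c => c == '.') rest with
      | none => simp [h, List.findIdx?_cons, hp', List.filter_cons, hd]
      | some v =>
        have hdr : (1 : Nat) + (v + 1) = (v + 1) + 1 := Nat.add_comm _ _
        simp [h, List.findIdx?_cons, hp', List.filter_cons, hd, List.take_succ_cons,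
          hdr, List.drop_succ_cons]
    · have hd' : PySem.Chars.isdigit c = false := by simpa using hd
      simp only [aLoop, hd', List.findIdx?_cons, if_false, Bool.and_false, Bool.false_and,
        Bool.false_eq_true, if_true, Bool.if_false_right, Bool.and_self]
      rw [ih]
      cases h : List.findIdx? PySem.Chars.isdigit rest with
      | none => simp [h]
      | some i =>
        simp only [h, Option.map_some, List.drop_succ_cons]
        cases h2 : List.findIdx? (fun c => c == '.') (rest.drop i) <;>
          simp [h2, List.filter_cons, hd', List.take_succ_cons, Nat.succ_add]

-- ===== VERDICT (by name: the statement is the Claim_ definition above) =====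
theorem validate_temp_spec : Claim_equal_validate_temp := by
  intro token _
  unfold Spec_validate_temp validate_temp validate_temp_alt bDigits
  rw [aLoop_main]
  cases h : List.findIdx? PySem.Chars.isdigit token.toList with
  | none => simp [h]
  | some i =>
    cases h2 : List.findIdx? (fun c => c == '.') (token.toList.drop i) <;> simp [h, h2]
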